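-- pv_equiv track=rewrite | github.com/Delta-Life/Bioinformatics | Rosalind/Bioinformatics Textbook Track/code/BA3C.py | overlap_graphs
-- ===== SOURCE A (Python) =====
-- from collections import defaultdict
--
-- def overlap_graphs(strand_array):
--     left_dic = defaultdict(list)
--     graph = []
--     k = len(strand_array[0]) - 1
--
--     for n, i in enumerate(strand_array):
--         left_dic[i[:k]].append(n)
--
--     for n, i in enumerate(strand_array):
--         tmp = left_dic[i[-k:]]
--         for j in tmp:
--             if n != j:
--                 graph.append([n, j])
--
--     return graph
-- ===== SOURCE B (Python) =====
-- def overlap_graphs(strand_array):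
--     k = len(strand_array[0]) - 1
--     graph = []
--     for n, s in enumerate(strand_array):
--         for j, t in enumerate(strand_array):
--             if n != j and s[-k:] == t[:k]:
--                 graph.append([n, j])
--     return graph
-- ===== Notes on version B (the rewrite author's own statement) =====
-- stated objective: simpler
-- what changed: Replaced the prefix-index defaultdict (group indices by (k)-prefix, then look up each suffix) by a direct all-pairs nested scan that appends [n, j] whenever n != j and the k-suffix of strand n equals the k-prefix of strand j.
import Mathlib
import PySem

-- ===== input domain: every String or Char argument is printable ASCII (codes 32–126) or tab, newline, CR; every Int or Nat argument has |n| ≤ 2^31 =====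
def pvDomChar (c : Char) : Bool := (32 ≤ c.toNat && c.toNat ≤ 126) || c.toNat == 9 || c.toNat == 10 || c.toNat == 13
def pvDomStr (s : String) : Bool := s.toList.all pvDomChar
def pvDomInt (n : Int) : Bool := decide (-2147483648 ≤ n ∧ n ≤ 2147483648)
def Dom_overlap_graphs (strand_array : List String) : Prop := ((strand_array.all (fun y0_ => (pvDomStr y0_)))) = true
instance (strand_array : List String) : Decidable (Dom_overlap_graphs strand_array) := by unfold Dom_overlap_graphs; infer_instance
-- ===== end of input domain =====

-- B replaces A's prefix-index dictionary with a plain all-pairs suffix/prefix scan (simpler, same return value).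

-- i[:k]  (k may be negative or zero; PySem slice is Python-exact)
def pvPref (k : Int) (t : String) : String := PySem.Str.slice t none (some k)
-- i[-k:]
def pvSuff (k : Int) (t : String) : String := PySem.Str.slice t (some (-k)) none

-- ===== PORT A =====
def overlap_graphs (strand_array : List String) : List (List Int) :=
  -- k = len(strand_array[0]) - 1 ; strand_array[0] raises on [] (excluded by Pre_), headD is the total form
  let k : Int := (PySem.Str.len (strand_array.headD "")) - 1
  -- for n, i in enumerate(strand_array): left_dic[i[:k]].append(n)   (defaultdict(list) ≙ Dict.modify with default [])
  let left_dic : PySem.Dict String (List Int) :=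
    (PySem.List.enumerate strand_array).foldl
      (fun d ni => d.modify (pvPref k ni.2) [] (fun v => v ++ [ni.1])) PySem.Dict.empty
  -- for n, i in enumerate(strand_array): tmp = left_dic[i[-k:]]; for j in tmp: if n != j: graph.append([n, j])
  -- (the defaultdict lookup may insert a fresh [] entry; that never changes any later lookup, so getD is exact here)
  (PySem.List.enumerate strand_array).foldl
    (fun graph ni =>
      let tmp := left_dic.getD (pvSuff k ni.2) []
      tmp.foldl (fun g j => if ni.1 ≠ j then g ++ [[ni.1, j]] else g) graph)
    []

-- ===== PORT B =====
def overlap_graphs_alt (strand_array : List String) : List (List Int) :=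
  let k : Int := (PySem.Str.len (strand_array.headD "")) - 1
  (PySem.List.enumerate strand_array).foldl
    (fun graph ns =>
      (PySem.List.enumerate strand_array).foldl
        (fun g jt => if ns.1 ≠ jt.1 ∧ pvSuff k ns.2 = pvPref k jt.2 then g ++ [[ns.1, jt.1]] else g)
        graph)
    []

-- ===== PRECONDITION & SPEC =====
-- Pre_ excludes exactly the empty list, on which the Python A raises IndexError at strand_array[0] (B raises there too).
def Pre_overlap_graphs (strand_array : List String) : Prop := strand_array ≠ []
instance (strand_array : List String) : Decidable (Pre_overlap_graphs strand_array) := by unfold Pre_overlap_graphs; infer_instance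
def pvWitness_overlap_graphs : List String := ["AAB", "ABA", "BAA"]
def Spec_overlap_graphs (strand_array : List String) (out : List (List Int)) : Prop := out = overlap_graphs_alt strand_array
instance (strand_array : List String) (out : List (List Int)) : Decidable (Spec_overlap_graphs strand_array out) := by unfold Spec_overlap_graphs; infer_instance

-- ===== CLAIM (what is proved, stated in full; the proofs are below) =====
def Claim_equal_overlap_graphs : Prop := ∀ (strand_array : List String), Dom_overlap_graphs strand_array → Pre_overlap_graphs strand_array → Spec_overlap_graphs strand_array (overlap_graphs strand_array)

-- ===== LEMMAS AND PROOFS =====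

-- A's grouping dict looks up to exactly the ascending list of indices whose k-prefix is `key`
theorem pv_dict_getD (k : Int) (lp : List (Int × String)) (key : String) :
    ((lp.foldl (fun d ni => d.modify (pvPref k ni.2) [] (fun v => v ++ [ni.1]))
        (PySem.Dict.empty : PySem.Dict String (List Int))).getD key [])
    = (lp.filter (fun ni => pvPref k ni.2 == key)).map (·.1) := by
  have h := PySem.Dict.getD_foldl_modify_append
      (l := lp.map (fun ni => (pvPref k ni.2, ni.1)))
      (d := (PySem.Dict.empty : PySem.Dict String (List Int))) (c := key)
  rw [List.foldl_map] at h
  simpa [List.filter_map, List.map_map, Function.comp] using h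

-- A's inner loop over the dict bucket equals B's inner scan over all pairs
theorem pv_inner (k : Int) (n : Int) (key : String) :
    ∀ (lp : List (Int × String)) (acc : List (List Int)),
    (((lp.filter (fun jt => pvPref k jt.2 == key)).map (·.1)).foldl
        (fun g j => if n ≠ j then g ++ [[n, j]] else g) acc)
    = lp.foldl (fun g jt => if n ≠ jt.1 ∧ key = pvPref k jt.2 then g ++ [[n, jt.1]] else g) acc := by
  intro lp
  induction lp with
  | nil => intro acc; rfl
  | cons jt rest ih =>
    intro acc
    by_cases hk : pvPref k jt.2 = key
    · rw [List.filter_cons_of_pos (by simpa using hk), List.map_cons, List.foldl_cons,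
        List.foldl_cons]
      by_cases hn : n = jt.1
      · rw [if_neg (by simp [hn]), if_neg (by simp [hn]), ih]
      · rw [if_pos hn, if_pos ⟨hn, hk.symm⟩, ih]
    · rw [List.filter_cons_of_neg (by simpa using hk), List.foldl_cons,
        if_neg (fun h => hk h.2.symm), ih]

-- ===== VERDICT (by name: the statement is the Claim_ definition above) =====
theorem overlap_graphs_spec : Claim_equal_overlap_graphs := by
  intro strand_array _ _
  show overlap_graphs strand_array = overlap_graphs_alt strand_array
  show
    (List.foldl
      (fun graph ni =>
        List.foldl (fun g j => if ni.1 ≠ j then g ++ [[ni.1, j]] else g) graph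
          ((List.foldl
              (fun d ni => d.modify (pvPref (PySem.Str.len (strand_array.headD "") - 1) ni.2) [] fun v => v ++ [ni.1])
              PySem.Dict.empty (PySem.List.enumerate strand_array)).getD
            (pvSuff (PySem.Str.len (strand_array.headD "") - 1) ni.2) []))
      [] (PySem.List.enumerate strand_array))
    = List.foldl
        (fun graph ns =>
          List.foldl
            (fun g jt =>
              if ns.1 ≠ jt.1 ∧ pvSuff (PySem.Str.len (strand_array.headD "") - 1) ns.2
                  = pvPref (PySem.Str.len (strand_array.headD "") - 1) jt.2
              then g ++ [[ns.1, jt.1]] else g)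
            graph (PySem.List.enumerate strand_array))
        [] (PySem.List.enumerate strand_array)
  congr 1
  funext graph ni
  rw [pv_dict_getD, pv_inner]
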